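-- pv_equiv track=rewrite | github.com/miliar/Code_Jam_Webscraper | solutions_python/Problem_55/591.py | solve
-- ===== SOURCE A (Python) =====
-- import copy
-- import math
--
-- def rl(l, offset):
--     if offset == 0:
--         rv = copy.copy(l)
--     else:
--         real_offset = offset % int(math.copysign(len(l), offset))
--         rv = (l[real_offset:] + l[:real_offset])
--     return rv
--
-- def solve(r,k,n,grp):
--     count=0
--     sf=0
--     prof=0
--     for i in range(0,r):
--         for x in grp:
--             count=count+int(x)
--             if count <= k:
--                 sf=sf+1
--                 prof=prof+int(x)
--         grp=rl(grp,sf)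
--         count=0
--         sf=0
--     return prof
-- ===== SOURCE B (Python) =====
-- def solve(r, k, n, grp):
--     m = len(grp)
--     if m == 0:
--         return 0
--     # one pass per starting offset: profit of that ride and the next offset
--     table = []
--     for s in range(m):
--         rot = grp[s:] + grp[:s]
--         c = 0
--         sf = 0
--         p = 0
--         for x in rot:
--             c += x
--             if c <= k:
--                 sf += 1
--                 p += x
--         table.append((p, (s + sf) % m))
--     prof = 0
--     s = 0
--     for _ in range(r):
--         p, s2 = table[s]
--         prof += p
--         s = s2
--     return prof
-- ===== Notes on version B (the rewrite author's own statement) =====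
-- stated objective: faster
-- what changed: Instead of rotating and rescanning the whole list for each of the r rides, B precomputes for every starting offset the ride's profit and the next offset in one pass over all rotations, then replays the r rides as O(1) table lookups.
import Mathlib
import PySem

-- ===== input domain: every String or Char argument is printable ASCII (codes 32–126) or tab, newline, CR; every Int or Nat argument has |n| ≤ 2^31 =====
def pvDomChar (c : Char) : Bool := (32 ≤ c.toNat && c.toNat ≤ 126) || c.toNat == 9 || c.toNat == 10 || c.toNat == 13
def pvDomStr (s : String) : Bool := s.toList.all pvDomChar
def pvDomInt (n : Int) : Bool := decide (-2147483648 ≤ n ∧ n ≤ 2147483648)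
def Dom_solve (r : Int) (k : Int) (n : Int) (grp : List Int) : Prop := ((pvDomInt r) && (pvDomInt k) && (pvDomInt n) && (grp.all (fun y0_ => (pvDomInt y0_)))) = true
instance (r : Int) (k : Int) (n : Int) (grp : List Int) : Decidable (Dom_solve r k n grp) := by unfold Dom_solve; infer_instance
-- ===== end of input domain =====

-- B replaces A's per-ride list rotation and rescan by a per-offset ride table built once, then r O(1) steps.

-- ===== PORT A =====
-- int(math.copysign(len(l), offset)) is exact here (list lengths fit a float)
def rl (l : List Int) (offset : Int) : List Int :=
  if offset = 0 then l
  else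
    let sgnLen : Int := if offset < 0 then -(l.length : Int) else (l.length : Int)
    let real_offset := PySem.Int.mod offset sgnLen
    PySem.List.slice l (some real_offset) none ++ PySem.List.slice l none (some real_offset)

def solve (r : Int) (k : Int) (n : Int) (grp : List Int) : Int :=
  let st := (PySem.List.pyRange 0 r 1).foldl
    (fun (st : List Int × Int × Int × Int) (_i : Int) =>
      let inner := st.1.foldl (fun (s : Int × Int × Int) x =>
        let count := s.1 + x
        if count ≤ k then (count, s.2.1 + 1, s.2.2 + x) else (count, s.2.1, s.2.2))
        (st.2.1, st.2.2.1, st.2.2.2)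
      (rl st.1 inner.2.1, 0, 0, inner.2.2))
    (grp, 0, 0, 0)
  st.2.2.2

-- ===== PORT B =====
def rideTable (k : Int) (m : Nat) (grp : List Int) : List (Int × Nat) :=
  (List.range m).map (fun s =>
    let rot := grp.drop s ++ grp.take s
    let res := rot.foldl (fun (st : Int × Int × Int) x =>
      let c := st.1 + x
      if c ≤ k then (c, st.2.1 + 1, st.2.2 + x) else (c, st.2.1, st.2.2)) (0, 0, 0)
    (res.2.2, ((((s : Int) + res.2.1) % (m : Int))).toNat))

def altLoop (table : List (Int × Nat)) : Nat → Nat → Int → Int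
  | 0, _, prof => prof
  | Nat.succ t, s, prof =>
      let e := table.getD s (0, 0)
      altLoop table t e.2 (prof + e.1)

def solve_alt (r : Int) (k : Int) (n : Int) (grp : List Int) : Int :=
  let m := grp.length
  if m = 0 then 0 else altLoop (rideTable k m grp) r.toNat 0 0

-- ===== PRECONDITION & SPEC =====
def Spec_solve (r : Int) (k : Int) (n : Int) (grp : List Int) (out : Int) : Prop := out = solve_alt r k n grp
instance (r : Int) (k : Int) (n : Int) (grp : List Int) (out : Int) : Decidable (Spec_solve r k n grp out) := by unfold Spec_solve; infer_instance

-- ===== CLAIM (what is proved, stated in full; the proofs are below) =====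
def Claim_equal_solve : Prop := ∀ (r : Int) (k : Int) (n : Int) (grp : List Int), Dom_solve r k n grp → Spec_solve r k n grp (solve r k n grp)

-- ===== LEMMAS AND PROOFS =====

-- the shared inner ride step
def rstep (k : Int) (s : Int × Int × Int) (x : Int) : Int × Int × Int :=
  let count := s.1 + x
  if count ≤ k then (count, s.2.1 + 1, s.2.2 + x) else (count, s.2.1, s.2.2)

-- offsetting sf/prof in the start state just offsets them in the result
theorem rstep_fold_shift (k : Int) (l : List Int) :
    ∀ (c s p : Int), l.foldl (rstep k) (c, s, p) =
      ((l.foldl (rstep k) (c, 0, 0)).1,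
       s + (l.foldl (rstep k) (c, 0, 0)).2.1,
       p + (l.foldl (rstep k) (c, 0, 0)).2.2) := by
  induction l with
  | nil => intro c s p; simp
  | cons x xs ih =>
    intro c s p
    simp only [List.foldl_cons, rstep]
    by_cases h : c + x ≤ k
    · simp only [h, if_pos]
      rw [ih (c + x) (s + 1) (p + x), ih (c + x) (0 + 1) (0 + x)]
      refine Prod.ext rfl (Prod.ext ?_ ?_) <;> simp <;> ring
    · simp only [h, if_neg, not_false_iff]
      exact ih (c + x) s p

theorem rstep_fold_sf_nonneg (k : Int) (l : List Int) :
    ∀ (c s p : Int), s ≤ (l.foldl (rstep k) (c, s, p)).2.1 := by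
  induction l with
  | nil => intro c s p; simp
  | cons x xs ih =>
    intro c s p
    simp only [List.foldl_cons, rstep]
    by_cases h : c + x ≤ k
    · simp only [h, if_pos]
      calc s ≤ s + 1 := by omega
        _ ≤ _ := ih (c + x) (s + 1) (p + x)
    · simp only [h, if_neg, not_false_iff]
      exact ih (c + x) s p

-- rl on a nonempty list with a nonnegative offset is rotation
theorem rl_eq_rotate (l : List Int) (sf : Int) (hne : l ≠ []) (hsf : 0 ≤ sf) :
    rl l sf = l.rotate sf.toNat := by
  unfold rl
  by_cases h0 : sf = 0
  · simp [h0]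
  · have hlen : 0 < l.length := List.length_pos_iff.mpr hne
    have hneg : ¬ sf < 0 := by omega
    rw [if_neg h0, if_neg hneg]
    show PySem.List.slice l (some (PySem.Int.mod sf ((l.length : Int)))) none ++
        PySem.List.slice l none (some (PySem.Int.mod sf ((l.length : Int)))) = l.rotate sf.toNat
    have hpos : (0 : Int) < (l.length : Int) := by exact_mod_cast hlen
    rw [PySem.Int.mod_eq_emod_of_pos hpos]
    have hro0 : 0 ≤ sf % (l.length : Int) := Int.emod_nonneg _ (by omega)
    have hrolt : sf % (l.length : Int) < (l.length : Int) := Int.emod_lt_of_pos _ hpos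
    rw [PySem.List.slice_from _ hro0, PySem.List.slice_to _ hro0]
    have hle : (sf % (l.length : Int)).toNat ≤ l.length := by omega
    rw [← List.rotate_eq_drop_append_take hle]
    have : (sf % (l.length : Int)).toNat = sf.toNat % l.length := by
      zify [Int.emod_nonneg sf (by omega : (l.length : Int) ≠ 0)]
      rw [Int.toNat_of_nonneg hsf]
      exact (Int.toNat_of_nonneg (show (0:Int) ≤ sf % (l.length : Int) from
        Int.emod_nonneg _ (by omega)))
    rw [this, List.rotate_mod]

-- table lookup at a valid offset
theorem rideTable_getD (k : Int) (grp : List Int) (s : Nat) (hs : s < grp.length) :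
    (rideTable k grp.length grp).getD s (0, 0) =
      (((grp.rotate s).foldl (rstep k) (0, 0, 0)).2.2,
       (((s : Int) + ((grp.rotate s).foldl (rstep k) (0, 0, 0)).2.1) % (grp.length : Int)).toNat) := by
  unfold rideTable
  rw [List.rotate_eq_drop_append_take (Nat.le_of_lt hs)]
  simp only [List.getD, List.getElem?_map, List.getElem?_range, hs, Option.map_some, Option.getD_some]
  rfl

-- main invariant: A's remaining outer loop from a rotated state equals B's table walk
theorem main_inv (k : Int) (grp : List Int) (hgrp : grp ≠ []) :
    ∀ (ids : List Int) (s : Nat) (prof : Int), s < grp.length →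
      (ids.foldl
        (fun (st : List Int × Int × Int × Int) (_i : Int) =>
          let inner := st.1.foldl (rstep k) (st.2.1, st.2.2.1, st.2.2.2)
          (rl st.1 inner.2.1, 0, 0, inner.2.2))
        (grp.rotate s, 0, 0, prof)).2.2.2
      = altLoop (rideTable k grp.length grp) ids.length s prof := by
  intro ids
  induction ids with
  | nil => intro s prof _; rfl
  | cons i is ih =>
    intro s prof hs
    have hlen : 0 < grp.length := List.length_pos_iff.mpr hgrp
    simp only [List.foldl_cons, List.length_cons, altLoop]
    set F := (grp.rotate s).foldl (rstep k) (0, 0, 0) with hF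
    have hshift := rstep_fold_shift k (grp.rotate s) 0 0 prof
    have hsf0 : (0:Int) ≤ F.2.1 := by
      have := rstep_fold_sf_nonneg k (grp.rotate s) 0 0 0
      simpa [hF] using this
    have hrotne : grp.rotate s ≠ [] := by
      intro h; exact hgrp (List.rotate_eq_nil_iff.mp h)
    have hrl : rl (grp.rotate s) F.2.1 = grp.rotate (s + F.2.1.toNat) := by
      rw [rl_eq_rotate _ _ hrotne hsf0, List.rotate_rotate]
    have hnext : grp.rotate (s + F.2.1.toNat) =
        grp.rotate ((((s : Int) + F.2.1) % (grp.length : Int)).toNat) := by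
      have hcast : (((s : Int) + F.2.1) % (grp.length : Int)).toNat
          = (s + F.2.1.toNat) % grp.length := by
        have harg : (s : Int) + F.2.1 = ((s + F.2.1.toNat : Nat) : Int) := by omega
        rw [harg]
        omega
      rw [hcast, List.rotate_mod]
    have hnextlt : (((s : Int) + F.2.1) % (grp.length : Int)).toNat < grp.length := by
      have hpos : (0 : Int) < (grp.length : Int) := by exact_mod_cast hlen
      have h1 := Int.emod_lt_of_pos ((s : Int) + F.2.1) hpos
      have h0 : (0:Int) ≤ ((s : Int) + F.2.1) % (grp.length : Int) :=
        Int.emod_nonneg _ (by omega)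
      omega
    rw [rideTable_getD k grp s hs]
    show (is.foldl _ (rl (grp.rotate s)
        ((grp.rotate s).foldl (rstep k) ((0:Int), (0:Int), prof)).2.1, 0, 0,
        ((grp.rotate s).foldl (rstep k) ((0:Int), (0:Int), prof)).2.2)).2.2.2 = _
    rw [hshift]
    simp only [← hF, zero_add]
    rw [hrl, hnext]
    rw [ih _ (prof + F.2.2) hnextlt]

-- the empty-list case: the outer loop fixes the state
theorem empty_case (k : Int) :
    ∀ (ids : List Int) (prof : Int),
      (ids.foldl
        (fun (st : List Int × Int × Int × Int) (_i : Int) =>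
          let inner := st.1.foldl (rstep k) (st.2.1, st.2.2.1, st.2.2.2)
          (rl st.1 inner.2.1, 0, 0, inner.2.2))
        (([] : List Int), 0, 0, prof)).2.2.2 = prof := by
  intro ids
  induction ids with
  | nil => intro prof; rfl
  | cons i is ih => intro prof; simpa [rl] using ih prof

-- ===== VERDICT (by name: the statement is the Claim_ definition above) =====
theorem solve_spec : Claim_equal_solve := by
  intro r k n grp _
  show solve r k n grp = solve_alt r k n grp
  unfold solve solve_alt
  by_cases hgrp : grp = []
  · subst hgrp
    simpa [rstep] using empty_case k (PySem.List.pyRange 0 r 1) 0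
  · have hlen : 0 < grp.length := List.length_pos_iff.mpr hgrp
    have hm : ¬ grp.length = 0 := by omega
    simp only [hm, if_neg, not_false_iff]
    have h0 : grp.rotate 0 = grp := List.rotate_zero grp
    have := main_inv k grp hgrp (PySem.List.pyRange 0 r 1) 0 0 hlen
    rw [h0] at this
    rw [PySem.List.length_pyRange_one] at this
    simpa [rstep] using this
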